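-- pv_equiv track=rewrite | github.com/motsognirr/olmlx | olmlx/chat/session.py | _detect_repetition
-- ===== SOURCE A (Python) =====
-- def _detect_repetition(
--     text: str, min_phrase_len: int = 20, min_repeats: int = 4
-- ) -> bool:
--     """Detect if the accumulated text contains a repeating phrase.
--
--     Searches the tail (last 1000 chars) of the text for any short
--     substring that repeats consecutively at least min_repeats times.
--     The phrase length is capped at 100 chars for performance; this
--     is a deliberate trade-off — very long repetitive blocks (e.g.
--     repeated function bodies >100 chars) won't be detected at the
--     default config values.  Lowering ``repetition_min_phrase_len``
--     or ``repetition_min_repeats`` increases detection surface at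
--     the cost of more checks per step.
--     """
--     if len(text) < min_phrase_len * min_repeats:
--         return False
--
--     if min_repeats < 1 or min_phrase_len < 1:
--         return False
--
--     tail = text[-1000:] if len(text) > 1000 else text
--     max_phrase_len = max(min_phrase_len, min(100, len(tail) // min_repeats))
--
--     for phrase_len in range(min_phrase_len, max_phrase_len + 1):
--         candidate = tail[-phrase_len:]
--         if not candidate.strip():
--             continue
--         count = 0
--         pos = len(tail)
--         while pos >= phrase_len:
--             segment = tail[pos - phrase_len : pos]
--             if segment == candidate:
--                 count += 1
--                 pos -= phrase_len
--             else:
--                 break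
--         if count >= min_repeats:
--             return True
--
--     return False
-- ===== SOURCE B (Python) =====
-- def _detect_repetition(
--     text: str, min_phrase_len: int = 20, min_repeats: int = 4
-- ) -> bool:
--     """Same contract as A: does the tail of the text end in a short phrase
--     repeated at least min_repeats times consecutively?"""
--     if len(text) < min_phrase_len * min_repeats:
--         return False
--     if min_repeats < 1 or min_phrase_len < 1:
--         return False
--     tail = text[-1000:] if len(text) > 1000 else text
--     n = len(tail)
--     max_phrase_len = max(min_phrase_len, min(100, n // min_repeats))
--     for phrase_len in range(min_phrase_len, max_phrase_len + 1):
--         if phrase_len > n: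
--             continue  # no candidate of that length exists in the tail
--         candidate = tail[n - phrase_len:]
--         if not candidate.strip():
--             continue
--         if tail.endswith(candidate * min_repeats):
--             return True
--     return False
-- ===== Notes on version B (the rewrite author's own statement) =====
-- stated objective: simpler
-- what changed: The inner while-loop that counts trailing repeats with a count/pos accumulator pair is replaced by building the expected repeated string once and doing a single tail.endswith(candidate * min_repeats) comparison (plus skipping phrase lengths longer than the tail, where no candidate of that length exists).
import Mathlib
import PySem

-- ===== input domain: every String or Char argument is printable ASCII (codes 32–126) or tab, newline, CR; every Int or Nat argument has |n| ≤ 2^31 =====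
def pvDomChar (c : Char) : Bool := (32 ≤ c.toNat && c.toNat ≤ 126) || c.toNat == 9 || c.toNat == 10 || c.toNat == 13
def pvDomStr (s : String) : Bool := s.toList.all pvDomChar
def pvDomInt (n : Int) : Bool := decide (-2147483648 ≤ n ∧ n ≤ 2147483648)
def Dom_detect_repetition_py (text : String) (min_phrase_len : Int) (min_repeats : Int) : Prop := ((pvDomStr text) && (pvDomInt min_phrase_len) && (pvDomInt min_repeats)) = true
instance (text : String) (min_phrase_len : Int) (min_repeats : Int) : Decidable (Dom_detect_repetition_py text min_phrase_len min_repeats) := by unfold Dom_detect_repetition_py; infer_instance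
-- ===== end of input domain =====

-- B replaces A's manual count/pos while-loop by one endswith comparison against
-- candidate repeated min_repeats times (objective: simpler).

-- ===== PORT A =====
-- inner while-loop of A: count consecutive trailing copies of cand; pos/count as in A.
-- the '0 < plen' conjunct only makes the recursion total (unreachable: plen ≥ min_phrase_len ≥ 1).
-- segment = tail[pos-plen:pos] is ported as (tail.drop (pos - plen)).take plen, exact since
-- the loop guard gives 0 ≤ pos - plen and plen = pos - (pos - plen).
def aInner (tail : List Char) (plen : Nat) (cand : List Char) (pos : Nat) (count : Nat) : Nat :=
  if h : 0 < plen ∧ plen ≤ pos then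
    if (tail.drop (pos - plen)).take plen = cand then
      aInner tail plen cand (pos - plen) (count + 1)
    else count
  else count
termination_by pos
decreasing_by omega

def detect_repetition_py (text : String) (min_phrase_len : Int) (min_repeats : Int) : Bool :=
  let t := text.toList
  if (t.length : Int) < min_phrase_len * min_repeats then false
  else if min_repeats < 1 ∨ min_phrase_len < 1 then false
  else
    let tail := if (1000 : Int) < (t.length : Int) then PySem.List.slice t (some (-1000)) none else t
    let maxp := max min_phrase_len (min 100 (PySem.Int.floordiv (tail.length : Int) min_repeats))
    -- the for-loop body is pure and returns True on first success: ported as .any over range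
    (PySem.List.pyRange min_phrase_len (maxp + 1) 1).any (fun plen =>
      let cand := PySem.List.slice tail (some (-plen)) none
      if (PySem.Chars.strip cand).isEmpty then false
      else decide (min_repeats ≤ (aInner tail plen.toNat cand tail.length 0 : Int)))

-- ===== PORT B =====
def detect_repetition_py_alt (text : String) (min_phrase_len : Int) (min_repeats : Int) : Bool :=
  let t := text.toList
  if (t.length : Int) < min_phrase_len * min_repeats then false
  else if min_repeats < 1 ∨ min_phrase_len < 1 then false
  else
    let tail := if (1000 : Int) < (t.length : Int) then PySem.List.slice t (some (-1000)) none else t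
    let n := tail.length
    let maxp := max min_phrase_len (min 100 (PySem.Int.floordiv (n : Int) min_repeats))
    (PySem.List.pyRange min_phrase_len (maxp + 1) 1).any (fun plen =>
      if (n : Int) < plen then false
      else
        let cand := tail.drop (n - plen.toNat)
        if (PySem.Chars.strip cand).isEmpty then false
        -- candidate * min_repeats ported as flatten (replicate min_repeats.toNat cand)
        else PySem.Chars.endswith tail (List.flatten (List.replicate min_repeats.toNat cand)))

-- ===== PRECONDITION & SPEC =====
def Spec_detect_repetition_py (text : String) (min_phrase_len : Int) (min_repeats : Int) (out : Bool) : Prop := out = detect_repetition_py_alt text min_phrase_len min_repeats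
instance (text : String) (min_phrase_len : Int) (min_repeats : Int) (out : Bool) : Decidable (Spec_detect_repetition_py text min_phrase_len min_repeats out) := by unfold Spec_detect_repetition_py; infer_instance

-- ===== CLAIM (what is proved, stated in full; the proofs are below) =====
def Claim_equal_detect_repetition_py : Prop := ∀ (text : String) (min_phrase_len : Int) (min_repeats : Int), Dom_detect_repetition_py text min_phrase_len min_repeats → Spec_detect_repetition_py text min_phrase_len min_repeats (detect_repetition_py text min_phrase_len min_repeats)

-- ===== LEMMAS AND PROOFS =====

lemma any_congr_mem {α : Type} (l : List α) (f g : α → Bool) (h : ∀ x ∈ l, f x = g x) :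
    l.any f = l.any g := by
  induction l with
  | nil => rfl
  | cons a l ih => simp only [List.any_cons, h a (by simp), ih (fun x hx => h x (by simp [hx]))]

lemma flatten_replicate_length (m : Nat) (c : List Char) :
    (List.flatten (List.replicate m c)).length = m * c.length := by
  induction m with
  | zero => simp
  | succ m ih => simp [List.replicate_succ, ih, Nat.succ_mul]; ring

lemma flatten_replicate_succ (m : Nat) (c : List Char) :
    List.flatten (List.replicate (m + 1) c) = List.flatten (List.replicate m c) ++ c := by
  rw [List.replicate_succ']; simp

lemma suffix_append_right_iff {α : Type} (u v c : List α) : u ++ c <:+ v ++ c ↔ u <:+ v := by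
  constructor
  · rintro ⟨w, hw⟩
    rw [← List.append_assoc] at hw
    exact ⟨w, List.append_cancel_right hw⟩
  · rintro ⟨w, hw⟩
    exact ⟨w, by rw [← List.append_assoc, hw]⟩

lemma aInner_add (tail : List Char) (plen : Nat) (cand : List Char) :
    ∀ pos count, aInner tail plen cand pos count = count + aInner tail plen cand pos 0 := by
  intro pos
  induction pos using Nat.strong_induction_on with
  | _ pos ih =>
    intro count
    by_cases h : 0 < plen ∧ plen ≤ pos
    · by_cases hs : (tail.drop (pos - plen)).take plen = cand
      · rw [aInner]
        conv_rhs => rw [aInner]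
        simp only [dif_pos h, if_pos hs]
        rw [ih (pos - plen) (by omega) (count + 1), ih (pos - plen) (by omega) (0 + 1)]
        omega
      · rw [aInner]
        conv_rhs => rw [aInner]
        simp only [dif_pos h, if_neg hs]
        omega
    · rw [aInner]
      conv_rhs => rw [aInner]
      simp only [dif_neg h]
      omega

lemma aInner_ge_iff (tail cand : List Char) (plen : Nat) (hp : 0 < plen)
    (hlen : cand.length = plen) :
    ∀ (k pos : Nat), pos ≤ tail.length →
      (k ≤ aInner tail plen cand pos 0 ↔
        List.flatten (List.replicate k cand) <:+ tail.take pos) := by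
  intro k
  induction k with
  | zero => intro pos _; simp [List.nil_suffix]
  | succ k ih =>
    intro pos hpos
    by_cases hle : plen ≤ pos
    · have h : 0 < plen ∧ plen ≤ pos := ⟨hp, hle⟩
      have hseglen : ((tail.drop (pos - plen)).take plen).length = plen := by
        simp [List.length_take, List.length_drop]
        omega
      have hsplit : tail.take pos
          = tail.take (pos - plen) ++ (tail.drop (pos - plen)).take plen := by
        have h0 := List.take_add (l := tail) (i := pos - plen) (j := plen)
        rw [(by omega : pos - plen + plen = pos)] at h0
        exact h0
      by_cases hs : (tail.drop (pos - plen)).take plen = cand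
      · rw [aInner]
        simp only [dif_pos h, if_pos hs]
        rw [aInner_add tail plen cand (pos - plen) (0 + 1)]
        rw [flatten_replicate_succ, hsplit, hs, suffix_append_right_iff]
        rw [← ih (pos - plen) (by omega)]
        omega
      · rw [aInner]
        simp only [dif_pos h, if_neg hs]
        constructor
        · omega
        · intro hsuf
          exfalso
          have hc : cand <:+ tail.take pos := by
            rcases hsuf with ⟨w, hw⟩
            rw [flatten_replicate_succ, ← List.append_assoc] at hw
            exact ⟨w ++ List.flatten (List.replicate k cand), hw⟩
          rcases hc with ⟨w, hw⟩
          rw [hsplit] at hw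
          have hlen2 : cand.length = ((tail.drop (pos - plen)).take plen).length := by
            rw [hlen, hseglen]
          exact hs ((List.append_inj' hw hlen2).2.symm)
    · rw [aInner]
      simp only [dif_neg (by omega : ¬(0 < plen ∧ plen ≤ pos))]
      constructor
      · omega
      · intro hsuf
        exfalso
        have hL := hsuf.length_le
        rw [flatten_replicate_length, hlen] at hL
        have h1 : (tail.take pos).length ≤ pos := by
          simp [List.length_take]
        have h2 : plen ≤ (k + 1) * plen := Nat.le_mul_of_pos_left plen (by omega)
        omega

lemma main_eq (text : String) (mpl mr : Int) :
    detect_repetition_py text mpl mr = detect_repetition_py_alt text mpl mr := by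
  unfold detect_repetition_py detect_repetition_py_alt
  simp only []
  set TL := if (1000 : Int) < ((text.toList).length : Int) then
      PySem.List.slice text.toList (some (-1000)) none else text.toList with hTL
  split_ifs with h1 h2
  · rfl
  · rfl
  · apply any_congr_mem
    intro plen hmem
    rw [PySem.List.mem_pyRange_one] at hmem
    have hmr : 1 ≤ mr := by omega
    have hmpl : 1 ≤ mpl := by omega
    have hplen : 1 ≤ plen := le_trans hmpl hmem.1
    have hpcast : plen = (plen.toNat : Int) := by omega
    have hcand : PySem.List.slice TL (some (-plen)) none
        = TL.drop (TL.length - plen.toNat) := by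
      rw [hpcast]
      exact PySem.List.slice_from_neg_natCast TL plen.toNat (by omega)
    rw [hcand]
    by_cases hover : (TL.length : Int) < plen
    · rw [if_pos hover]
      split
      · rfl
      · rw [aInner]
        rw [dif_neg (by omega : ¬(0 < plen.toNat ∧ plen.toNat ≤ TL.length))]
        simp only [decide_eq_false_iff_not]
        omega
    · rw [if_neg hover]
      split
      · rfl
      · have hclen : (TL.drop (TL.length - plen.toNat)).length = plen.toNat := by
          simp only [List.length_drop]
          omega
        have hkey := aInner_ge_iff TL (TL.drop (TL.length - plen.toNat)) plen.toNat
          (by omega) hclen mr.toNat TL.length (le_refl _)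
        rw [List.take_length] at hkey
        by_cases hdec : mr ≤ ((aInner TL plen.toNat (TL.drop (TL.length - plen.toNat)) TL.length 0 : Nat) : Int)
        · rw [decide_eq_true hdec]
          exact ((PySem.Chars.endswith_iff _ _).mpr (hkey.mp (by omega))).symm
        · rw [decide_eq_false hdec]
          by_contra hne
          have hE : PySem.Chars.endswith TL
              (List.flatten (List.replicate mr.toNat (TL.drop (TL.length - plen.toNat)))) = true := by
            cases hEE : PySem.Chars.endswith TL
                (List.flatten (List.replicate mr.toNat (TL.drop (TL.length - plen.toNat)))) with
            | true => rfl
            | false => exact absurd hEE.symm hne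
          have := hkey.mpr ((PySem.Chars.endswith_iff _ _).mp hE)
          omega

-- ===== VERDICT (by name: the statement is the Claim_ definition above) =====
theorem detect_repetition_py_spec : Claim_equal_detect_repetition_py := by
  intro text mpl mr _
  exact main_eq text mpl mr
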